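-- pv_equiv track=rewrite | github.com/thinhhoang95/project-rustlingtree | src/simap/examples/run_a320_kdfw_fms.py | _phase_span_indices
-- ===== SOURCE A (Python) =====
-- def _phase_span_indices(phases: tuple[str, ...]) -> list[tuple[str, int, int]]:
--     if not phases:
--         return []
--     spans: list[tuple[str, int, int]] = []
--     start = 0
--     current = phases[0]
--     for idx, phase in enumerate(phases[1:], start=1):
--         if phase != current:
--             spans.append((current, start, idx - 1))
--             start = idx
--             current = phase
--     spans.append((current, start, len(phases) - 1))
--     return spans
-- ===== SOURCE B (Python) =====
-- def _phase_span_indices(phases):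
--     n = len(phases)
--     starts = [i for i in range(n) if i == 0 or phases[i] != phases[i - 1]]
--     ends = starts[1:] + [n]
--     return [(phases[s], s, e - 1) for s, e in zip(starts, ends)]
-- ===== Notes on version B (the rewrite author's own statement) =====
-- stated objective: alternative
-- what changed: Replaces A's single-pass change-detection loop carrying (current, start) state with a staged approach: first compute the list of run-start boundary indices (i where phases[i] differs from phases[i-1]), then pair each start with the next start (or n) and build the spans by indexing.
import Mathlib
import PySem

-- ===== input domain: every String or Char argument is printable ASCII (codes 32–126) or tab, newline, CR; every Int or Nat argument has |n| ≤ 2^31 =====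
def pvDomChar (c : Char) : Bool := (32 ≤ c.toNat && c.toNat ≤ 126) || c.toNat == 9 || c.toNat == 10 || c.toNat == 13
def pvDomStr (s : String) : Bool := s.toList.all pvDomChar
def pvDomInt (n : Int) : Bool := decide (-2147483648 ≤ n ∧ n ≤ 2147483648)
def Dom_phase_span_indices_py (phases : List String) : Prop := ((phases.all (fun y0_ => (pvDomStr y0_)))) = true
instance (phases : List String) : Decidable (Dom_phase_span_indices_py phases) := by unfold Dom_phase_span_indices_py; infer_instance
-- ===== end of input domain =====

-- B is a staged re-implementation: stage 1 lists the run-boundary indices, stage 2 pairs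
-- consecutive boundaries into (label, start, end) spans; same O(n) cost (alternative decomposition).

-- ===== PORT A =====
-- literal transliteration of A: state (spans, start, current), loop over enumerate(phases[1:], start=1)
def phase_span_indices_py (phases : List String) : List (String × Int × Int) :=
  match phases with
  | [] => []
  | p0 :: rest =>
    let st := (PySem.List.enumerate rest 1).foldl
      (fun (st : List (String × Int × Int) × Int × String) (ip : Int × String) =>
        if ip.2 ≠ st.2.2 then (st.1 ++ [(st.2.2, st.2.1, ip.1 - 1)], ip.1, ip.2) else st)
      ([], 0, p0)
    st.1 ++ [(st.2.2, st.2.1, (phases.length : Int) - 1)]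

-- ===== PORT B =====
-- transliteration of B: list comprehension over range(n) collecting boundary indices, then
-- zip(starts, starts[1:] + [n]) built into spans.  Indexing phases[i] / phases[i-1] is ported as
-- getD (exact: every index produced by range(n) is in range, and i-1 is only read when i ≥ 1
-- because `or` short-circuits; the value at i = 0 is unused in both languages).
def phase_span_indices_py_alt (phases : List String) : List (String × Int × Int) :=
  let n := phases.length
  let starts := (List.range n).filter (fun i => i == 0 || phases.getD i "" != phases.getD (i - 1) "")
  let ends := starts.drop 1 ++ [n]
  (starts.zip ends).map (fun se => (phases.getD se.1 "", (se.1 : Int), (se.2 : Int) - 1))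

-- ===== PRECONDITION & SPEC =====
def Spec_phase_span_indices_py (phases : List String) (out : List (String × Int × Int)) : Prop := out = phase_span_indices_py_alt phases
instance (phases : List String) (out : List (String × Int × Int)) : Decidable (Spec_phase_span_indices_py phases out) := by unfold Spec_phase_span_indices_py; infer_instance

-- ===== CLAIM (what is proved, stated in full; the proofs are below) =====
def Claim_equal_phase_span_indices_py : Prop := ∀ (phases : List String), Dom_phase_span_indices_py phases → Spec_phase_span_indices_py phases (phase_span_indices_py phases)

-- ===== LEMMAS AND PROOFS =====

-- recursive characterisation of A's loop-plus-final-append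
def aRuns : List String → Int → String → Int → List (String × Int × Int)
  | [], start, cur, i => [(cur, start, i - 1)]
  | p :: rest, start, cur, i =>
    if p ≠ cur then (cur, start, i - 1) :: aRuns rest i p (i + 1)
    else aRuns rest start cur (i + 1)

-- A's fold (followed by the final append) computes aRuns
theorem fold_eq_aRuns (l : List String) (acc : List (String × Int × Int))
    (start : Int) (cur : String) (i : Int) :
    (let st := (PySem.List.enumerate l i).foldl
      (fun (st : List (String × Int × Int) × Int × String) (ip : Int × String) =>
        if ip.2 ≠ st.2.2 then (st.1 ++ [(st.2.2, st.2.1, ip.1 - 1)], ip.1, ip.2) else st)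
      (acc, start, cur)
    st.1 ++ [(st.2.2, st.2.1, i + l.length - 1)]) = acc ++ aRuns l start cur i := by
  induction l generalizing acc start cur i with
  | nil => simp [PySem.List.enumerate, aRuns]
  | cons p rest ih =>
    simp only [PySem.List.enumerate_cons, List.foldl_cons, aRuns, List.length_cons]
    push_cast
    rw [show (i + ((rest.length : Int) + 1) - 1) = i + 1 + (rest.length : Int) - 1 by ring]
    by_cases h : p = cur
    · rw [if_neg (by simp [h]), if_neg (by simp [h])]
      exact ih acc start cur (i + 1)
    · rw [if_pos (by simpa using h), if_pos (by simpa using h)]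
      have := ih (acc ++ [(cur, start, i - 1)]) i p (i + 1)
      simpa using this

-- relative change-point indices of a list, given the previous element
def bStarts : String → List String → List Nat
  | _, [] => []
  | prev, x :: t => if x == prev then (bStarts x t).map Nat.succ
                    else 0 :: (bStarts x t).map Nat.succ

-- the comprehension's inner filter computes bStarts
theorem filter_eq_bStarts (m : List String) (prev : String) :
    (List.range m.length).filter (fun j => m.getD j "" != (prev :: m).getD j "") = bStarts prev m := by
  induction m generalizing prev with
  | nil => simp [bStarts]
  | cons x t ih =>
    rw [List.length_cons, List.range_succ_eq_map, List.filter_cons, List.filter_map]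
    have hshift : (fun j => (x :: t).getD j "" != (prev :: x :: t).getD j "") ∘ Nat.succ
        = (fun j => t.getD j "" != (x :: t).getD j "") := by
      funext j; simp [Function.comp, List.getD]
    rw [hshift, ih x]
    by_cases h : x = prev
    · simp [bStarts, h]
    · simp [bStarts, h, bne, Ne.symm]

-- the full starts list of a nonempty list
theorem range_filter_eq (p : String) (m : List String) :
    (List.range (p :: m).length).filter
        (fun i => i == 0 || (p :: m).getD i "" != (p :: m).getD (i - 1) "")
      = 0 :: (bStarts p m).map Nat.succ := by
  rw [List.length_cons, List.range_succ_eq_map, List.filter_cons, List.filter_map]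
  have hshift : (fun i => i == 0 || (p :: m).getD i "" != (p :: m).getD (i - 1) "") ∘ Nat.succ
      = (fun j => m.getD j "" != (p :: m).getD j "") := by
    funext j; simp [Function.comp, List.getD]
  rw [hshift, filter_eq_bStarts]
  simp

-- the main bridge: pairing the absolute change points produces aRuns
theorem mk_eq_aRuns (m : List String) (L : List String) (prev : String) (i start : Nat)
    (hL : L.drop i = m) (hi : i ≤ L.length) (hprev : L.getD start "" = prev) :
    (((start :: (bStarts prev m).map (· + i)).zip
        (((start :: (bStarts prev m).map (· + i)).drop 1) ++ [L.length])).map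
      (fun se => (L.getD se.1 "", (se.1 : Int), (se.2 : Int) - 1)))
      = aRuns m (start : Int) prev (i : Int) := by
  induction m generalizing prev i start with
  | nil =>
    have hlen : i = L.length := by
      have := congrArg List.length hL
      simp [List.length_drop] at this
      omega
    simp only [bStarts, aRuns, List.map_nil, List.drop_one, List.tail_cons, List.nil_append,
      List.zip_cons_cons, List.zip_nil_left, List.map_cons, List.map_nil, hlen, hprev]
  | cons x t ih =>
    have hlen : i < L.length := by
      have := congrArg List.length hL
      simp [List.length_drop] at this
      omega
    have hL' : L.drop (i + 1) = t := by
      have h2 := congrArg (List.drop 1) hL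
      simpa [List.drop_drop, Nat.add_comm] using h2
    have hx : L.getD i "" = x := by
      have h3 : (L.drop i).getD 0 "" = x := by rw [hL]; rfl
      simpa [List.getD_eq_getElem?_getD, List.getElem?_drop] using h3
    by_cases h : x = prev
    · -- same as previous element: no new boundary
      have hb : bStarts prev (x :: t) = (bStarts prev t).map Nat.succ := by
        simp [bStarts, h]
      have hmap : ((bStarts prev t).map Nat.succ).map (· + i)
          = (bStarts prev t).map (· + (i + 1)) := by
        simp only [List.map_map]
        exact List.map_congr_left fun a _ => by simp [Function.comp]; omega
      have hih := ih prev (i + 1) start hL' (by omega) hprev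
      push_cast at hih
      rw [hb, hmap]
      rw [show aRuns (x :: t) (start : Int) prev (i : Int)
            = aRuns t (start : Int) prev ((i : Int) + 1) by simp [aRuns, h]]
      exact hih
    · -- boundary at absolute index i
      have hb : bStarts prev (x :: t) = 0 :: (bStarts x t).map Nat.succ := by
        simp [bStarts, h]
      have hmap : ((0 :: (bStarts x t).map Nat.succ).map (· + i))
          = i :: (bStarts x t).map (· + (i + 1)) := by
        simp only [List.map_cons, List.map_map, Nat.zero_add, List.cons.injEq, true_and]
        exact List.map_congr_left fun a _ => by simp [Function.comp]; omega
      have hih := ih x (i + 1) i hL' (by omega) hx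
      push_cast at hih
      rw [hb, hmap]
      rw [show aRuns (x :: t) (start : Int) prev (i : Int)
            = (prev, (start : Int), (i : Int) - 1) :: aRuns t (i : Int) x ((i : Int) + 1) by
          simp [aRuns, h]]
      rw [← hih]
      simp
      simpa [List.getD_eq_getElem?_getD] using hprev

-- ===== VERDICT (by name: the statement is the Claim_ definition above) =====
theorem phase_span_indices_py_spec : Claim_equal_phase_span_indices_py := by
  intro phases _
  unfold Spec_phase_span_indices_py
  cases phases with
  | nil => simp [phase_span_indices_py, phase_span_indices_py_alt]
  | cons p rest =>
    show (let st := (PySem.List.enumerate rest 1).foldl _ ([], 0, p)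
          st.1 ++ [(st.2.2, st.2.1, ((p :: rest).length : Int) - 1)]) = _
    rw [show (((p :: rest).length : Int) - 1) = 1 + (rest.length : Int) - 1 by
      push_cast [List.length_cons]; ring]
    rw [fold_eq_aRuns rest [] 0 p 1, List.nil_append]
    have hB : phase_span_indices_py_alt (p :: rest)
        = ((((List.range (p :: rest).length).filter
              (fun i => i == 0 || (p :: rest).getD i "" != (p :: rest).getD (i - 1) "")).zip
            ((((List.range (p :: rest).length).filter
              (fun i => i == 0 || (p :: rest).getD i "" != (p :: rest).getD (i - 1) "")).drop 1)
              ++ [(p :: rest).length])).map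
          (fun se => ((p :: rest).getD se.1 "", (se.1 : Int), (se.2 : Int) - 1))) := rfl
    rw [hB, range_filter_eq p rest]
    have hmap : (bStarts p rest).map Nat.succ = (bStarts p rest).map (· + 1) := rfl
    rw [hmap]
    have := mk_eq_aRuns rest (p :: rest) p 1 0 rfl (by simp) rfl
    push_cast at this
    exact this.symm
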